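-- pv_equiv track=rewrite | github.com/XX-net/XX-Net | gae_proxy/local/gae_handler.py | clean_empty_header
-- ===== SOURCE A (Python) =====
-- def clean_empty_header(headers):
--     remove_list = []
--     for key in headers:
--         value = headers[key]
--         if value == "":
--             remove_list.append(key)
--
--     for key in remove_list:
--         del headers[key]
--
--     return headers
-- ===== SOURCE B (Python) =====
-- def clean_empty_header(headers):
--     # Build-then-replace: one comprehension pass keeps the non-empty entries,
--     # then the original dict is refilled in place (same object returned).
--     kept = {k: v for k, v in headers.items() if v != ""}
--     headers.clear()
--     headers.update(kept)
--     return headers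
-- ===== Notes on version B (the rewrite author's own statement) =====
-- stated objective: simpler
-- what changed: A collects the empty-valued keys in a first pass and then deletes them one by one with repeated dict lookups/deletions; B builds the kept mapping in a single comprehension pass and replaces the dict contents via clear()+update(), preserving object identity.
import Mathlib
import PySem

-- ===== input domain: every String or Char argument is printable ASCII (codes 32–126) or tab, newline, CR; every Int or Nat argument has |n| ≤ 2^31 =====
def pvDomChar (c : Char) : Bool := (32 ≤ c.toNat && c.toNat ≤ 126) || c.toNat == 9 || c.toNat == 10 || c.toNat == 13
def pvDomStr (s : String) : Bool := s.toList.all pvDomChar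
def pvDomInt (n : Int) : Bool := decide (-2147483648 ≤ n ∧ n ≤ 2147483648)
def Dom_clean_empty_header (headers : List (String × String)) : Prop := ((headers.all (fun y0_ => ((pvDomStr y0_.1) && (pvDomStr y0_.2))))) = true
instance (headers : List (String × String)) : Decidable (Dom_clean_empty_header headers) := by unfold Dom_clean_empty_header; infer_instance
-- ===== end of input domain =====

-- B replaces A's collect-keys-then-delete two-step by one filtering pass followed by clear+update
-- (same object, same entries, same order); equivalence is about the returned entry list.

-- ===== PORT A =====
-- first loop: 'for key in headers: value = headers[key]; if value == "": remove_list.append(key)'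
-- (dict lookup = first match); second loop: 'for key in remove_list: del headers[key]'.
def clean_empty_header (headers : List (String × String)) : List (String × String) :=
  let remove_list := headers.foldl (fun acc kv =>
    let value := (((headers.find? (fun p => p.1 == kv.1)).map Prod.snd).getD "")
    if value = "" then acc ++ [kv.1] else acc) ([] : List String)
  remove_list.foldl (fun h key => h.eraseP (fun p => p.1 == key)) headers

-- ===== PORT B =====
-- kept = {k: v for k, v in headers.items() if v != ""}; headers.clear(); headers.update(kept):
-- the dict's entries become exactly the kept pairs, in order.
def clean_empty_header_alt (headers : List (String × String)) : List (String × String) :=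
  headers.filter (fun kv => kv.2 != "")

-- ===== PRECONDITION & SPEC =====
-- headers is a Python dict: its keys are necessarily distinct, so Pre_ excludes nothing a caller can pass.
def Pre_clean_empty_header (headers : List (String × String)) : Prop :=
  (headers.map Prod.fst).Nodup
instance (headers : List (String × String)) : Decidable (Pre_clean_empty_header headers) := by
  unfold Pre_clean_empty_header; infer_instance

def pvWitness_clean_empty_header : (List (String × String)) :=
  [("Host", "example.com"), ("X-Empty", ""), ("Accept", "*/*")]

def Spec_clean_empty_header (headers : List (String × String)) (out : List (String × String)) : Prop := out = clean_empty_header_alt headers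
instance (headers : List (String × String)) (out : List (String × String)) : Decidable (Spec_clean_empty_header headers out) := by unfold Spec_clean_empty_header; infer_instance

-- ===== CLAIM (what is proved, stated in full; the proofs are below) =====
def Claim_equal_clean_empty_header : Prop := ∀ (headers : List (String × String)), Dom_clean_empty_header headers → Pre_clean_empty_header headers → Spec_clean_empty_header headers (clean_empty_header headers)

-- ===== LEMMAS AND PROOFS =====

-- Under distinct keys, the dict lookup of kv's key finds kv itself.
theorem find_self_of_nodup (l : List (String × String))
    (hnd : (l.map Prod.fst).Nodup) (kv : String × String) (hm : kv ∈ l) :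
    l.find? (fun p => p.1 == kv.1) = some kv := by
  induction l with
  | nil => cases hm
  | cons a t ih =>
    simp only [List.map_cons, List.nodup_cons] at hnd
    rcases List.mem_cons.mp hm with rfl | hmt
    · simp [List.find?]
    · have hne : a.1 ≠ kv.1 := by
        intro h; exact hnd.1 (h ▸ List.mem_map_of_mem hmt)
      have hb : (a.1 == kv.1) = false := by simpa using hne
      simp only [List.find?, hb]
      exact ih hnd.2 hmt

theorem foldl_collect_keys (l : List (String × String)) (acc : List String) :
    l.foldl (fun acc kv => if kv.2 = "" then acc ++ [kv.1] else acc) acc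
    = acc ++ (l.filter (fun kv => kv.2 == "")).map Prod.fst := by
  induction l generalizing acc with
  | nil => simp
  | cons a t ih =>
    rw [List.foldl_cons]
    by_cases h : a.2 = ""
    · rw [if_pos h, ih, List.filter_cons_of_pos (by simpa using h)]
      simp
    · rw [if_neg h, ih, List.filter_cons_of_neg (by simpa using h)]

-- The first loop collects exactly the keys of the empty-valued pairs.
theorem remove_list_eq (headers : List (String × String))
    (hnd : (headers.map Prod.fst).Nodup) :
    headers.foldl (fun acc kv =>
      if (((headers.find? (fun p => p.1 == kv.1)).map Prod.snd).getD "") = ""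
      then acc ++ [kv.1] else acc) ([] : List String)
    = (headers.filter (fun kv => kv.2 == "")).map Prod.fst := by
  have hcg : headers.foldl (fun acc kv =>
      if (((headers.find? (fun p => p.1 == kv.1)).map Prod.snd).getD "") = ""
      then acc ++ [kv.1] else acc) ([] : List String)
    = headers.foldl (fun acc kv => if kv.2 = "" then acc ++ [kv.1] else acc) [] := by
    apply PySem.List.foldl_congr_mem
    intro acc kv hm
    rw [find_self_of_nodup headers hnd kv hm]
    rfl
  rw [hcg]
  simpa using foldl_collect_keys headers []

-- On a nodup-keyed list, erasing the first entry with a key erases every entry with it.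
theorem eraseP_eq_filter (l : List (String × String)) (k : String)
    (hnd : (l.map Prod.fst).Nodup) :
    l.eraseP (fun p => p.1 == k) = l.filter (fun p => p.1 != k) := by
  induction l with
  | nil => rfl
  | cons a t ih =>
    simp only [List.map_cons, List.nodup_cons] at hnd
    by_cases h : a.1 = k
    · have : t.filter (fun p => p.1 != k) = t := by
        apply List.filter_eq_self.mpr
        intro p hp
        have : p.1 ≠ k := by
          intro hk; exact hnd.1 ((h.trans hk.symm) ▸ List.mem_map_of_mem hp)
        simpa using this
      simp [h, this]
    · simp [h, ih hnd.2]

theorem nodup_filter_keys (l : List (String × String)) (p : String × String → Bool)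
    (hnd : (l.map Prod.fst).Nodup) : ((l.filter p).map Prod.fst).Nodup :=
  List.Nodup.sublist (List.Sublist.map Prod.fst List.filter_sublist) hnd

-- The deletion loop over any key list amounts to one filter.
theorem foldl_erase_eq_filter (ks : List String) (l : List (String × String))
    (hnd : (l.map Prod.fst).Nodup) :
    ks.foldl (fun h key => h.eraseP (fun p => p.1 == key)) l
    = l.filter (fun p => !(ks.contains p.1)) := by
  induction ks generalizing l with
  | nil => simp
  | cons k kt ih =>
    simp only [List.foldl_cons]
    rw [eraseP_eq_filter l k hnd, ih _ (nodup_filter_keys l _ hnd), List.filter_filter]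
    apply List.filter_congr
    intro p _
    by_cases h : p.1 = k <;> simp [h]

-- ===== VERDICT (by name: the statement is the Claim_ definition above) =====
theorem clean_empty_header_spec : Claim_equal_clean_empty_header := by
  intro headers _ hpre
  unfold Spec_clean_empty_header clean_empty_header clean_empty_header_alt
  simp only []
  rw [remove_list_eq headers hpre, foldl_erase_eq_filter _ _ hpre]
  apply List.filter_congr
  intro p hp
  have hiff : p.1 ∈ (headers.filter (fun kv => kv.2 == "")).map Prod.fst ↔ p.2 = "" := by
    constructor
    · intro h
      rcases List.mem_map.mp h with ⟨q, hq, hk⟩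
      rcases List.mem_filter.mp hq with ⟨hqm, hqv⟩
      have h1 := find_self_of_nodup headers hpre q hqm
      have h2 := find_self_of_nodup headers hpre p hp
      rw [hk] at h1
      have : q = p := by
        have := h1.symm.trans h2
        simpa using this
      subst this
      simpa using hqv
    · intro h
      exact List.mem_map_of_mem (List.mem_filter.mpr ⟨hp, by simpa using h⟩)
  by_cases hv : p.2 = ""
  · simp [hv, hiff.mpr hv]
  · have : p.1 ∉ (headers.filter (fun kv => kv.2 == "")).map Prod.fst := fun h => hv (hiff.mp h)
    simp [hv, this]
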